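-- pv_equiv track=rewrite | github.com/HimanshuLadva/Python-DSA | Leetcode/Weekly Contest 303/2354.py | countExcellentPairs
-- ===== SOURCE A (Python) =====
-- import bisect
--
-- def countExcellentPairs(nums, k):
--     # Step 1: remove duplicates
--     nums = list(set(nums))
--
--     # Step 2: precompute bit counts
--     counts = [bin(x).count("1") for x in nums]
--     counts.sort()
--
--     # Step 3: count pairs
--     ans = 0
--     n = len(counts)
--
--     for c in counts:
--         # Need c' >= k - c
--         idx = bisect.bisect_left(counts, k - c)
--         ans += (n - idx)
--
--     return ans
-- ===== SOURCE B (Python) =====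
-- def countExcellentPairs(nums, k):
--     # Bucket the popcounts of the distinct values, then count pairs of buckets
--     # whose popcounts sum to at least k: there are at most 33 distinct popcount buckets.
--     freq = {}
--     for x in set(nums):
--         c = bin(x).count("1")
--         freq[c] = freq.get(c, 0) + 1
--     items = list(freq.items())
--     ans = 0
--     for c1, f1 in items:
--         for c2, f2 in items:
--             if c1 + c2 >= k:
--                 ans += f1 * f2
--     return ans
-- ===== Notes on version B (the rewrite author's own statement) =====
-- stated objective: alternative
-- what changed: Instead of sorting the popcount list and doing a binary search per element, B buckets the popcounts of the distinct values into a frequency dictionary and counts qualifying pairs by a double loop over its at most 33 buckets.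
import Mathlib
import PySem

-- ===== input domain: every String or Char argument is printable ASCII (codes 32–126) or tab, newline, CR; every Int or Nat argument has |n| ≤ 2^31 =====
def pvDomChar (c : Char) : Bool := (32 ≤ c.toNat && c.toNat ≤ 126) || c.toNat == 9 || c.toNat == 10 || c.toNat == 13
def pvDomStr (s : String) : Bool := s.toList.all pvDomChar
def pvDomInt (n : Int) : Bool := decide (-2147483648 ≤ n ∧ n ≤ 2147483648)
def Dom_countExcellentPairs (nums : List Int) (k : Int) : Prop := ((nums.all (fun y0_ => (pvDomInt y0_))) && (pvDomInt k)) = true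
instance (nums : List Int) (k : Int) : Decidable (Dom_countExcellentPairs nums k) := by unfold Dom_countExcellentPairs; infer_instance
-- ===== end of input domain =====

-- B replaces A's sort + per-element binary search by a popcount frequency table and
-- a double loop over its (at most 33) buckets: an alternative algorithm, not claimed faster.

-- ===== PORT A =====
-- bin(x).count("1") is the popcount of |x|: ported with the prelude primitive PySem.Int.bitCount (exact incl. negatives)
def countExcellentPairs (nums : List Int) (k : Int) : Int :=
  -- nums = list(set(nums))
  let nums' : List Int := PySem.Set.ofList nums
  -- counts = [bin(x).count("1") for x in nums]; counts.sort()
  let counts0 : List Int := nums'.map (fun x => (PySem.Int.bitCount x : Int))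
  let counts : List Int := PySem.List.sorted counts0 (fun c => c)
  let n : Int := (counts.length : Int)
  -- for c in counts: idx = bisect.bisect_left(counts, k - c); ans += n - idx
  counts.foldl (fun ans c => ans + (n - (PySem.List.bisectLeft counts (k - c) : Int))) 0

-- ===== PORT B =====
def countExcellentPairs_alt (nums : List Int) (k : Int) : Int :=
  -- freq = {}; for x in set(nums): c = bin(x).count("1"); freq[c] = freq.get(c, 0) + 1
  let freq : PySem.Dict Int Int :=
    (PySem.Set.ofList nums : List Int).foldl
      (fun d x => d.insert ((PySem.Int.bitCount x : Int)) (d.getD ((PySem.Int.bitCount x : Int)) 0 + 1))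
      PySem.Dict.empty
  let items := freq.items
  -- for c1, f1 in items: for c2, f2 in items: if c1 + c2 >= k: ans += f1 * f2
  items.foldl (fun ans p =>
    items.foldl (fun ans q => if k ≤ p.1 + q.1 then ans + p.2 * q.2 else ans) ans) 0

-- ===== PRECONDITION & SPEC =====
def Spec_countExcellentPairs (nums : List Int) (k : Int) (out : Int) : Prop := out = countExcellentPairs_alt nums k
instance (nums : List Int) (k : Int) (out : Int) : Decidable (Spec_countExcellentPairs nums k out) := by unfold Spec_countExcellentPairs; infer_instance

-- ===== CLAIM (what is proved, stated in full; the proofs are below) =====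
def Claim_equal_countExcellentPairs : Prop := ∀ (nums : List Int) (k : Int), Dom_countExcellentPairs nums k → Spec_countExcellentPairs nums k (countExcellentPairs nums k)

-- ===== LEMMAS AND PROOFS =====

-- the common value both programs compute, per element c of the popcount list l:
-- how many c' in l satisfy k - c ≤ c'
def pvCommon (l : List Int) (k c : Int) : Int := (l.countP (fun c' => decide (k - c ≤ c')) : Int)

-- grouping a sum over a list by its distinct values with multiplicities
theorem pv_group (l : List Int) (g : Int → Int) :
    (((PySem.Set.ofList l : List Int)).map (fun c => (l.count c : Int) * g c)).sum
      = (l.map g).sum := by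
  have hnd := PySem.Set.nodup_ofList l
  rw [← List.sum_toFinset _ hnd]
  have hfin : (PySem.Set.ofList l : List Int).toFinset = l.toFinset := by
    ext a; simp [List.mem_toFinset, PySem.Set.mem_ofList]
  rw [hfin]
  have h := Finset.sum_multiset_map_count (l : Multiset Int) g
  simp only [Multiset.map_coe, Multiset.sum_coe, Multiset.coe_count] at h
  rw [h]
  apply Finset.sum_congr rfl
  intro c _
  simp

-- on the sorted list, n - bisect_left(cs, x) counts the elements ≥ x
theorem pv_bisect (cs : List Int) (x : Int)
    (hs : List.Pairwise (fun a b => a ≤ b) cs) :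
    (cs.length : Int) - (PySem.List.bisectLeft cs x : Int)
      = (cs.countP (fun c' => decide (x ≤ c')) : Int) := by
  obtain ⟨hle, hlt, hge⟩ := PySem.List.bisectLeft_spec cs x hs
  set i := PySem.List.bisectLeft cs x with hi
  have h1 : (cs.take i).countP (fun c' => decide (x ≤ c')) = 0 := by
    rw [List.countP_eq_zero]
    intro a ha
    obtain ⟨j, hj, rfl⟩ := List.mem_iff_getElem.mp ha
    have hjl : j < cs.length := lt_of_lt_of_le hj (by simp)
    have hji : j < i := lt_of_lt_of_le hj (by simp)
    have := hlt j hjl hji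
    simp only [List.getElem_take] at *
    simp; omega
  have h2 : (cs.drop i).countP (fun c' => decide (x ≤ c')) = (cs.drop i).length := by
    rw [List.countP_eq_length]
    intro a ha
    obtain ⟨j, hj, rfl⟩ := List.mem_iff_getElem.mp ha
    have hjl : i + j < cs.length := by simpa [List.length_drop] using Nat.add_lt_of_lt_sub' (by simpa using hj)
    have := hge (i + j) hjl (Nat.le_add_right _ _)
    simp only [List.getElem_drop] at *
    simpa using this
  have hcount : cs.countP (fun c' => decide (x ≤ c')) = cs.length - i := by
    conv_lhs => rw [← List.take_append_drop i cs]
    rw [List.countP_append, h1, h2, List.length_drop]; omega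
  rw [hcount]
  push_cast [Nat.cast_sub hle]
  ring

theorem pv_A_eq (nums : List Int) (k : Int) :
    countExcellentPairs nums k
      = (((PySem.Set.ofList nums : List Int).map (fun x => (PySem.Int.bitCount x : Int))).map
          (fun c => pvCommon ((PySem.Set.ofList nums : List Int).map (fun x => (PySem.Int.bitCount x : Int))) k c)).sum := by
  simp only [countExcellentPairs]
  set counts0 := (PySem.Set.ofList nums : List Int).map (fun x => (PySem.Int.bitCount x : Int)) with hc0
  set cs := PySem.List.sorted counts0 (fun c => c) with hcs
  have hperm : List.Perm cs counts0 := PySem.List.sorted_perm _ _ _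
  have hpair : List.Pairwise (fun a b : Int => a ≤ b) cs :=
    PySem.List.sorted_pairwise counts0 (fun c => c)
  rw [PySem.List.foldl_add]
  have hmap : cs.map (fun c => (cs.length : Int) - (PySem.List.bisectLeft cs (k - c) : Int))
      = cs.map (fun c => pvCommon counts0 k c) := by
    apply List.map_congr_left
    intro c _
    rw [pv_bisect cs (k - c) hpair, hperm.countP_eq]
    rfl
  rw [hmap, List.Perm.sum_eq (hperm.map _)]
  simp

theorem pv_foldl_if {α : Type} (l : List α) (c : α → Prop) [DecidablePred c] (g : α → Int) (a : Int) :
    l.foldl (fun acc x => if c x then acc + g x else acc) a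
      = a + (l.map (fun x => if c x then g x else 0)).sum := by
  have he : (fun (acc : Int) x => if c x then acc + g x else acc)
      = (fun acc x => acc + if c x then g x else 0) := by
    funext acc x; split <;> simp
  rw [he, PySem.List.foldl_add]

theorem pv_B_eq (nums : List Int) (k : Int) :
    countExcellentPairs_alt nums k
      = (((PySem.Set.ofList nums : List Int).map (fun x => (PySem.Int.bitCount x : Int))).map
          (fun c => pvCommon ((PySem.Set.ofList nums : List Int).map (fun x => (PySem.Int.bitCount x : Int))) k c)).sum := by
  simp only [countExcellentPairs_alt]
  set counts0 := (PySem.Set.ofList nums : List Int).map (fun x => (PySem.Int.bitCount x : Int)) with hc0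
  have hfreq : (PySem.Set.ofList nums : List Int).foldl
      (fun d x => d.insert ((PySem.Int.bitCount x : Int)) (d.getD ((PySem.Int.bitCount x : Int)) 0 + 1))
      PySem.Dict.empty = PySem.Dict.counter counts0 := by
    rw [hc0, ← PySem.Dict.foldl_insert_getD_add_one_eq_counter, List.foldl_map]
  rw [hfreq, PySem.Dict.items_counter]
  set D := (PySem.Set.ofList counts0 : List Int) with hD
  set items := D.map (fun c => (c, (counts0.count c : Int))) with hitems
  -- inner loops become sums
  have hinner : ∀ (a : Int) (p : Int × Int),
      items.foldl (fun ans q => if k ≤ p.1 + q.1 then ans + p.2 * q.2 else ans) a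
        = a + (items.map (fun q => if k ≤ p.1 + q.1 then p.2 * q.2 else 0)).sum := by
    intro a p; exact pv_foldl_if items (fun q => k ≤ p.1 + q.1) (fun q => p.2 * q.2) a
  have houter : items.foldl (fun ans p =>
      items.foldl (fun ans q => if k ≤ p.1 + q.1 then ans + p.2 * q.2 else ans) ans) 0
      = ((items.map (fun p => (items.map (fun q => if k ≤ p.1 + q.1 then p.2 * q.2 else 0)).sum)).sum) := by
    have : (fun (ans : Int) (p : Int × Int) =>
        items.foldl (fun ans q => if k ≤ p.1 + q.1 then ans + p.2 * q.2 else ans) ans)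
        = (fun (ans : Int) (p : Int × Int) => ans + (items.map (fun q => if k ≤ p.1 + q.1 then p.2 * q.2 else 0)).sum) := by
      funext ans p; exact hinner ans p
    rw [this, PySem.List.foldl_add]; simp
  rw [houter]
  -- evaluate the inner sum per distinct popcount c1
  have hin : ∀ c1 : Int,
      (items.map (fun q => if k ≤ c1 + q.1 then (counts0.count c1 : Int) * q.2 else 0)).sum
        = (counts0.count c1 : Int) * pvCommon counts0 k c1 := by
    intro c1
    rw [hitems, List.map_map]
    have h1 : ((fun q : Int × Int => if k ≤ c1 + q.1 then (counts0.count c1 : Int) * q.2 else 0) ∘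
        (fun c => (c, (counts0.count c : Int))))
        = (fun c2 => (counts0.count c2 : Int) * (if k ≤ c1 + c2 then (counts0.count c1 : Int) else 0)) := by
      funext c2; simp only [Function.comp]; split <;> simp [mul_comm]
    rw [h1, pv_group counts0 (fun c2 => if k ≤ c1 + c2 then (counts0.count c1 : Int) else 0)]
    have h2 : (counts0.map (fun c2 => if k ≤ c1 + c2 then (counts0.count c1 : Int) else 0))
        = counts0.map (fun c2 => (counts0.count c1 : Int) * (if (fun c2 => decide (k ≤ c1 + c2)) c2 = true then 1 else 0)) := by
      apply List.map_congr_left; intro c2 _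
      by_cases h : k ≤ c1 + c2 <;> simp [h]
    rw [h2, List.sum_map_mul_left, PySem.List.sum_map_ite_one_zero]
    have h3 : (fun c2 => decide (k ≤ c1 + c2)) = (fun c' => decide (k - c1 ≤ c')) := by
      funext c'; rw [decide_eq_decide]; omega
    rw [h3]; rfl
  have h4 : (items.map (fun p => (items.map (fun q => if k ≤ p.1 + q.1 then p.2 * q.2 else 0)).sum))
      = D.map (fun c1 => (counts0.count c1 : Int) * pvCommon counts0 k c1) := by
    rw [hitems, List.map_map]
    apply List.map_congr_left; intro c1 _
    simp only [Function.comp]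
    exact hin c1
  rw [h4, pv_group counts0 (fun c => pvCommon counts0 k c)]

-- ===== VERDICT (by name: the statement is the Claim_ definition above) =====
theorem countExcellentPairs_spec : Claim_equal_countExcellentPairs := by
  intro nums k _
  unfold Spec_countExcellentPairs
  rw [pv_A_eq, pv_B_eq]
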